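-- pv_equiv track=rewrite | github.com/mij983/HaviAgenticServiceAssignment | agents/feedback_agent.py | _fuzzy_match_group
-- ===== SOURCE A (Python) =====
-- def _fuzzy_match_group(raw: str, valid_groups: list[str]) -> str:
--     """Return the best matching valid group for a user-typed string, or ''."""
--     raw_lower = raw.lower().strip()
--     # Exact
--     if raw in valid_groups:
--         return raw
--     # Case-insensitive exact
--     for g in valid_groups:
--         if g.lower() == raw_lower:
--             return g
--     # Substring
--     for g in valid_groups:
--         if raw_lower in g.lower() or g.lower() in raw_lower:
--             return g
--     return ""
-- ===== SOURCE B (Python) =====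
-- def _fuzzy_match_group(raw: str, valid_groups: list[str]) -> str:
--     """Single pass: rank each group (0 exact, 1 case-insensitive, 2 substring),
--     keep the earliest group with the lowest rank."""
--     raw_lower = raw.lower().strip()
--     best, best_rank = "", 3
--     for g in valid_groups:
--         gl = g.lower()
--         if g == raw:
--             rank = 0
--         elif gl == raw_lower:
--             rank = 1
--         elif raw_lower in gl or gl in raw_lower:
--             rank = 2
--         else:
--             continue
--         if rank < best_rank:
--             best, best_rank = g, rank
--             if best_rank == 0:
--                 break
--     return best
-- ===== Notes on version B (the rewrite author's own statement) =====
-- stated objective: alternative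
-- what changed: Replaces A's three sequential scans of valid_groups with a single loop that assigns each group a priority rank (0 exact, 1 case-insensitive, 2 substring) and tracks the earliest lowest-rank group, breaking on an exact match.
import Mathlib
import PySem

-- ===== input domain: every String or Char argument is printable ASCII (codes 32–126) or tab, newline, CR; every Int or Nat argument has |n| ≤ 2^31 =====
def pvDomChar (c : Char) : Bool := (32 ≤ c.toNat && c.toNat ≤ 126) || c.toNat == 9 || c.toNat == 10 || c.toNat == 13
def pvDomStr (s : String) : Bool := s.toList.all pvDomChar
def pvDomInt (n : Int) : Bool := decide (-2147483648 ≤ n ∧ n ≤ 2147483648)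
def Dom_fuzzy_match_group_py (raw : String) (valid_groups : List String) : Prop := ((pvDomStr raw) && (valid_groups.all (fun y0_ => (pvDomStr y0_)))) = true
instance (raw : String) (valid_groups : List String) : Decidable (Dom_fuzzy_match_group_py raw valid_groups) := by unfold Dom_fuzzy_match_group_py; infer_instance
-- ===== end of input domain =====

-- B merges A's three sequential scans into one ranked pass (alternative decomposition, same cost).


-- ===== PORT A =====
-- 'raw in valid_groups' is List.contains; each 'for g: if …: return g' loop is the
-- corresponding first-match scan (List.find?).
def fuzzy_match_group_py (raw : String) (valid_groups : List String) : String :=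
  let raw_lower := PySem.Str.strip (PySem.Str.lower raw)
  if valid_groups.contains raw then raw
  else
    match valid_groups.find? (fun g => PySem.Str.lower g == raw_lower) with
    | some g => g
    | none =>
      match valid_groups.find? (fun g =>
          PySem.Str.isIn raw_lower (PySem.Str.lower g) ||
          PySem.Str.isIn (PySem.Str.lower g) raw_lower) with
      | some g => g
      | none => ""

-- ===== PORT B =====
-- single loop carrying (best, best_rank); rank 0 breaks out of the loop
def fmgAltLoop (raw rl : String) : List String → String → Nat → String
  | [], best, _ => best
  | g :: rest, best, bestRank =>
    let gl := PySem.Str.lower g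
    let rank? : Option Nat :=
      if g == raw then some 0
      else if gl == rl then some 1
      else if PySem.Str.isIn rl gl || PySem.Str.isIn gl rl then some 2
      else none
    match rank? with
    | none => fmgAltLoop raw rl rest best bestRank
    | some r =>
      if r < bestRank then
        (if r = 0 then g else fmgAltLoop raw rl rest g r)
      else fmgAltLoop raw rl rest best bestRank

def fuzzy_match_group_py_alt (raw : String) (valid_groups : List String) : String :=
  let rl := PySem.Str.strip (PySem.Str.lower raw)
  fmgAltLoop raw rl valid_groups "" 3

-- ===== PRECONDITION & SPEC =====
def Spec_fuzzy_match_group_py (raw : String) (valid_groups : List String) (out : String) : Prop := out = fuzzy_match_group_py_alt raw valid_groups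
instance (raw : String) (valid_groups : List String) (out : String) : Decidable (Spec_fuzzy_match_group_py raw valid_groups out) := by unfold Spec_fuzzy_match_group_py; infer_instance

-- ===== CLAIM (what is proved, stated in full; the proofs are below) =====
def Claim_equal_fuzzy_match_group_py : Prop := ∀ (raw : String) (valid_groups : List String), Dom_fuzzy_match_group_py raw valid_groups → Spec_fuzzy_match_group_py raw valid_groups (fuzzy_match_group_py raw valid_groups)

-- ===== LEMMAS AND PROOFS =====

-- first-match scan is insensitive to pointwise-equal predicates
theorem fmg_find?_congr {α : Type} (p q : α → Bool) (l : List α)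
    (h : ∀ x ∈ l, p x = q x) : l.find? p = l.find? q := by
  induction l with
  | nil => rfl
  | cons a t ih =>
    simp only [List.find?_cons]
    rw [h a (List.mem_cons_self), ih (fun x hx => h x (List.mem_cons_of_mem a hx))]

-- loop with best_rank = 1: only an exact match can still win
theorem fmgAltLoop_one (raw rl : String) (l : List String) (best : String) :
    fmgAltLoop raw rl l best 1 = (l.find? (fun g => g == raw)).getD best := by
  induction l generalizing best with
  | nil => rfl
  | cons g t ih =>
    by_cases h0 : g = raw
    · simp [fmgAltLoop, h0]
    · have h0' : (g == raw) = false := by simp [h0]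
      by_cases h1 : (PySem.Str.lower g == rl) = true
      · simp [fmgAltLoop, h0', h1, ih]
      · have h1' := eq_false_of_ne_true h1
        by_cases h2 : (PySem.Str.isIn rl (PySem.Str.lower g) || PySem.Str.isIn (PySem.Str.lower g) rl) = true
        · simp at h2
          rcases h2 with h | h <;> simp [fmgAltLoop, h0', h1', h, ih]
        · have h2' := eq_false_of_ne_true h2
          simp at h2'
          simp [fmgAltLoop, h0', h1', h2'.1, h2'.2, ih]

-- loop with best_rank = 2: exact beats case-insensitive, earliest wins within a tier
theorem fmgAltLoop_two (raw rl : String) (l : List String) (best : String) :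
    fmgAltLoop raw rl l best 2 =
      match l.find? (fun g => g == raw) with
      | some g => g
      | none =>
        match l.find? (fun g => !(g == raw) && (PySem.Str.lower g == rl)) with
        | some g => g
        | none => best := by
  induction l generalizing best with
  | nil => rfl
  | cons g t ih =>
    by_cases h0 : g = raw
    · simp [fmgAltLoop, h0]
    · have h0' : (g == raw) = false := by simp [h0]
      by_cases h1 : (PySem.Str.lower g == rl) = true
      · have e1 : fmgAltLoop raw rl (g :: t) best 2 = fmgAltLoop raw rl t g 1 := by
          simp [fmgAltLoop, h0', h1]
        rw [e1, fmgAltLoop_one]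
        cases hf : t.find? (fun g => g == raw) with
        | none => simp [List.find?_cons, h0', h1, hf]
        | some h => simp [List.find?_cons, h0', h1, hf]
      · have h1' := eq_false_of_ne_true h1
        by_cases h2 : (PySem.Str.isIn rl (PySem.Str.lower g) || PySem.Str.isIn (PySem.Str.lower g) rl) = true
        · simp at h2
          rcases h2 with h | h <;>
            simp [fmgAltLoop, h0', h1', h, ih, List.find?_cons]
        · have h2' := eq_false_of_ne_true h2
          simp at h2'
          simp [fmgAltLoop, h0', h1', h2'.1, h2'.2, ih, List.find?_cons]

-- loop with best_rank = 3 (the initial state): full three-tier characterisation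
theorem fmgAltLoop_three (raw rl : String) (l : List String) (best : String) :
    fmgAltLoop raw rl l best 3 =
      match l.find? (fun g => g == raw) with
      | some g => g
      | none =>
        match l.find? (fun g => !(g == raw) && (PySem.Str.lower g == rl)) with
        | some g => g
        | none =>
          match l.find? (fun g => !(g == raw) && !(PySem.Str.lower g == rl) &&
              (PySem.Str.isIn rl (PySem.Str.lower g) || PySem.Str.isIn (PySem.Str.lower g) rl)) with
          | some g => g
          | none => best := by
  induction l generalizing best with
  | nil => rfl
  | cons g t ih =>
    by_cases h0 : g = raw
    · simp [fmgAltLoop, h0]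
    · have h0' : (g == raw) = false := by simp [h0]
      by_cases h1 : (PySem.Str.lower g == rl) = true
      · have e1 : fmgAltLoop raw rl (g :: t) best 3 = fmgAltLoop raw rl t g 1 := by
          simp [fmgAltLoop, h0', h1]
        rw [e1, fmgAltLoop_one]
        cases hf : t.find? (fun g => g == raw) with
        | none => simp [List.find?_cons, h0', h1, hf]
        | some h => simp [List.find?_cons, h0', h1, hf]
      · have h1' := eq_false_of_ne_true h1
        by_cases h2 : (PySem.Str.isIn rl (PySem.Str.lower g) || PySem.Str.isIn (PySem.Str.lower g) rl) = true
        · have e2 : fmgAltLoop raw rl (g :: t) best 3 = fmgAltLoop raw rl t g 2 := by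
            simp at h2
            rcases h2 with h | h <;> simp [fmgAltLoop, h0', h1', h]
          rw [e2, fmgAltLoop_two]
          simp at h2
          cases hf : t.find? (fun g => g == raw) with
          | none =>
            cases hf1 : t.find? (fun g => !(g == raw) && (PySem.Str.lower g == rl)) with
            | none =>
              rcases h2 with h | h <;> simp [List.find?_cons, h0', h1', h, hf, hf1]
            | some h' =>
              rcases h2 with h | h <;> simp [List.find?_cons, h0', h1', h, hf, hf1]
          | some h' => simp [List.find?_cons, h0', hf]
        · have h2' := eq_false_of_ne_true h2
          simp at h2'
          have e3 : fmgAltLoop raw rl (g :: t) best 3 = fmgAltLoop raw rl t best 3 := by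
            simp [fmgAltLoop, h0', h1', h2'.1, h2'.2]
          rw [e3, ih]
          simp [List.find?_cons, h0', h1', h2'.1, h2'.2]

-- ===== VERDICT (by name: the statement is the Claim_ definition above) =====
theorem fuzzy_match_group_py_spec : Claim_equal_fuzzy_match_group_py := by
  intro raw vg _
  unfold Spec_fuzzy_match_group_py fuzzy_match_group_py fuzzy_match_group_py_alt
  rw [fmgAltLoop_three]
  by_cases hmem : raw ∈ vg
  · have hc : vg.contains raw = true := by simpa using hmem
    have hf : vg.find? (fun g => g == raw) = some raw := by
      cases hfind : vg.find? (fun g => g == raw) with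
      | none =>
        exfalso
        have := List.find?_eq_none.mp hfind raw hmem
        simp at this
      | some g =>
        have := List.find?_some hfind
        simp at this
        simp [this]
    rw [hc, hf]
    simp
  · have hc : vg.contains raw = false := by simpa using hmem
    have hne : ∀ g ∈ vg, (g == raw) = false := by
      intro g hg
      simp only [beq_eq_false_iff_ne, ne_eq]
      rintro rfl; exact hmem hg
    have hf : vg.find? (fun g => g == raw) = none :=
      List.find?_eq_none.mpr (fun g hg => by simp [hne g hg])
    have hq1 : vg.find? (fun g => !(g == raw) &&
          (PySem.Str.lower g == PySem.Str.strip (PySem.Str.lower raw)))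
        = vg.find? (fun g => PySem.Str.lower g == PySem.Str.strip (PySem.Str.lower raw)) :=
      fmg_find?_congr _ _ vg (fun g hg => by rw [hne g hg]; simp)
    rw [hc, hf, hq1]
    simp only [Bool.false_eq_true, if_false]
    cases hf1 : vg.find? (fun g => PySem.Str.lower g == PySem.Str.strip (PySem.Str.lower raw)) with
    | some g => simp
    | none =>
      have hq2 : vg.find? (fun g => !(g == raw) &&
            !(PySem.Str.lower g == PySem.Str.strip (PySem.Str.lower raw)) &&
            (PySem.Str.isIn (PySem.Str.strip (PySem.Str.lower raw)) (PySem.Str.lower g) ||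
             PySem.Str.isIn (PySem.Str.lower g) (PySem.Str.strip (PySem.Str.lower raw))))
          = vg.find? (fun g =>
            PySem.Str.isIn (PySem.Str.strip (PySem.Str.lower raw)) (PySem.Str.lower g) ||
            PySem.Str.isIn (PySem.Str.lower g) (PySem.Str.strip (PySem.Str.lower raw))) := by
        apply fmg_find?_congr
        intro g hg
        have e1 := List.find?_eq_none.mp hf1 g hg
        rw [hne g hg, eq_false_of_ne_true e1]
        simp
      rw [hq2]
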